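-- pv_equiv track=rewrite | github.com/Jormii/NarrativeLanguage | VirtualMachine/program.py | find_percent_characters
-- ===== SOURCE A (Python) =====
-- def find_percent_characters(string):
--     indices = []
--     for i, c in enumerate(string):
--         if c != "%":
--             continue
--
--         prev = "" if i == 0 else string[i - 1]
--         if prev != "\\":
--             indices.append(i)
--
--     return indices
-- ===== SOURCE B (Python) =====
-- def find_percent_characters(string):
--     indices = []
--     pos = -1
--     for part in string.split("%")[:-1]:
--         pos += len(part) + 1
--         if not part.endswith("\\"):
--             indices.append(pos)
--     return indices
-- ===== Notes on version B (the rewrite author's own statement) =====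
-- stated objective: faster
-- what changed: Replaces the per-character Python scan with a split-based algorithm: partition the string at '%' with str.split (a C-level primitive), recover each percent's index from cumulative part lengths, and test escaping with endswith('\\') on the preceding part.
import Mathlib
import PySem

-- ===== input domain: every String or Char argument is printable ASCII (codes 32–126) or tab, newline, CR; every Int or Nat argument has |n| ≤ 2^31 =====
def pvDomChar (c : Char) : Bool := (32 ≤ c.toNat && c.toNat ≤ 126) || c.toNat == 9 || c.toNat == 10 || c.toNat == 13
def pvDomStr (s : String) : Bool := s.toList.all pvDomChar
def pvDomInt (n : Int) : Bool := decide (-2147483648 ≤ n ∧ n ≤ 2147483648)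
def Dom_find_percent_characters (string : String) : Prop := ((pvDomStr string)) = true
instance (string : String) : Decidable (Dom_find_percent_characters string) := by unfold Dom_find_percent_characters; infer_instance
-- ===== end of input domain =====

-- B replaces A's per-character scan with a split-based algorithm: split at '%', recover
-- indices from cumulative part lengths, test escaping with endswith('\') (measured faster at a timing run: the Python loop body runs per part, not per character).

-- ===== PORT A =====
-- prev is "" (Python empty string) when i == 0, else the one-char string string[i-1];
-- ported as Option Char: none = "", some c = string[i-1] (pyGet? is exact there).
def find_percent_characters (string : String) : List Int :=
  (PySem.List.enumerate string.toList 0).foldl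
    (fun indices ic =>
      if ic.2 ≠ '%' then indices
      else
        if (if ic.1 = 0 then none else PySem.Chars.pyGet? string.toList (ic.1 - 1)) ≠ some '\\'
        then indices ++ [ic.1] else indices)
    []

-- ===== PORT B =====
-- parts = string.split("%")  (sep "%" ≠ "", so Python split is exactly Chars.splitOn);
-- then the loop over parts[:-1] carrying (indices, pos).
def find_percent_characters_alt (string : String) : List Int :=
  ((PySem.Chars.splitOn string.toList ['%']).dropLast.foldl
    (fun st part =>
      ((if PySem.Chars.endswith part ['\\'] then st.1
        else st.1 ++ [st.2 + (part.length : Int) + 1]),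
       st.2 + (part.length : Int) + 1))
    ([], -1)).1

-- ===== PRECONDITION & SPEC =====
def Spec_find_percent_characters (string : String) (out : List Int) : Prop := out = find_percent_characters_alt string
instance (string : String) (out : List Int) : Decidable (Spec_find_percent_characters string out) := by unfold Spec_find_percent_characters; infer_instance

-- ===== CLAIM (what is proved, stated in full; the proofs are below) =====
def Claim_equal_find_percent_characters : Prop := ∀ (string : String), Dom_find_percent_characters string → Spec_find_percent_characters string (find_percent_characters string)

-- ===== LEMMAS AND PROOFS =====

/-- Reference function for A: scan carrying the previous character. -/
def pvScan (p : Option Char) (i : Int) : List Char → List Int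
  | [] => []
  | c :: cs => (if c = '%' ∧ p ≠ some '\\' then [i] else []) ++ pvScan (some c) (i + 1) cs

/-- Reference function for B: scan carrying only "previous char is a backslash". -/
def pvScanB (esc : Bool) (i : Int) : List Char → List Int
  | [] => []
  | c :: cs => (if c = '%' ∧ esc = false then [i] else []) ++ pvScanB (c == '\\') (i + 1) cs

/-- The two reference scans agree. -/
lemma pvScan_eq_pvScanB (l : List Char) : ∀ (p : Option Char) (i : Int),
    pvScan p i l = pvScanB (p == some '\\') i l := by
  induction l with
  | nil => intro p i; simp [pvScan, pvScanB]
  | cons c cs ih =>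
    intro p i
    simp only [pvScan, pvScanB, ih]
    by_cases h : p = some '\\' <;> by_cases hc : c = '%' <;> by_cases h2 : c = '\\' <;>
      simp [h, hc, h2]

/-- Fuel-free model of `PySem.Chars.splitOn · ['%']`. -/
def pvSplitAux : List Char → List Char → List (List Char)
  | [], cur => [cur.reverse]
  | c :: cs, cur => if c = '%' then cur.reverse :: pvSplitAux cs [] else pvSplitAux cs (c :: cur)

lemma pvSplitAux_ne_nil (l cur : List Char) : pvSplitAux l cur ≠ [] := by
  induction l generalizing cur with
  | nil => simp [pvSplitAux]
  | cons c cs ih => by_cases h : c = '%' <;> simp [pvSplitAux, h, ih]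

lemma splitOn_go_eq (fuel : Nat) : ∀ (l cur : List Char) (acc : List (List Char)),
    l.length ≤ fuel →
    PySem.Chars.splitOn.go ['%'] fuel l cur acc = acc.reverse ++ pvSplitAux l cur := by
  induction fuel with
  | zero =>
    intro l cur acc h
    have : l = [] := List.length_eq_zero_iff.mp (Nat.le_zero.mp h)
    subst this
    simp [PySem.Chars.splitOn.go, pvSplitAux]
  | succ n ih =>
    intro l cur acc h
    cases l with
    | nil => simp [PySem.Chars.splitOn.go, pvSplitAux]
    | cons c rest =>
      simp only [List.length_cons, Nat.succ_le_succ_iff] at h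
      by_cases hc : c = '%'
      · have hpre : ['%'].isPrefixOf (c :: rest) = true := by simp [hc, List.isPrefixOf]
        simp only [PySem.Chars.splitOn.go, hpre]
        rw [show List.drop (['%'].length) (c :: rest) = rest by simp]
        rw [ih rest [] (cur.reverse :: acc) h]
        simp [pvSplitAux, hc]
      · have hpre : ['%'].isPrefixOf (c :: rest) = false := by
          simp [List.isPrefixOf]; exact fun h' => hc h'.symm
        simp only [PySem.Chars.splitOn.go, hpre, Bool.false_eq_true, if_false]
        rw [ih rest (c :: cur) acc h]
        simp [pvSplitAux, hc]

lemma splitOn_eq_aux (l : List Char) :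
    PySem.Chars.splitOn l ['%'] = pvSplitAux l [] := by
  unfold PySem.Chars.splitOn
  rw [splitOn_go_eq (l.length + 1) l [] [] (Nat.le_succ _)]
  simp

lemma endswith_reverse_backslash (cur : List Char) :
    PySem.Chars.endswith cur.reverse ['\\'] = (cur.head? == some '\\') := by
  cases cur with
  | nil => simp [PySem.Chars.endswith, List.isSuffixOf]
  | cons h t =>
    simp only [PySem.Chars.endswith, List.isSuffixOf, List.reverse_cons, List.reverse_append,
      List.reverse_reverse, List.reverse_cons, List.reverse_nil, List.nil_append,
      List.head?_cons]
    by_cases hb : h = '\\' <;> simp [hb, List.isPrefixOf, eq_comm]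

/-- B's fold over the split parts computes the backslash-tracking scan. -/
lemma b_fold_eq (l : List Char) : ∀ (cur : List Char) (i : Int) (acc : List Int),
    ((pvSplitAux l cur).dropLast.foldl
      (fun st part =>
        ((if PySem.Chars.endswith part ['\\'] then st.1
          else st.1 ++ [st.2 + (part.length : Int) + 1]),
         st.2 + (part.length : Int) + 1))
      (acc, i - (cur.length : Int) - 1)).1
      = acc ++ pvScanB (cur.head? == some '\\') i l := by
  induction l with
  | nil => intro cur i acc; simp [pvSplitAux, pvScanB]
  | cons c cs ih =>
    intro cur i acc
    by_cases hc : c = '%'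
    · have hne : pvSplitAux cs [] ≠ [] := pvSplitAux_ne_nil cs []
      subst hc
      simp only [pvSplitAux]
      rw [if_pos trivial, List.dropLast_cons_of_ne_nil hne, List.foldl_cons]
      simp only [endswith_reverse_backslash, List.length_reverse]
      have hpos : i - (cur.length : Int) - 1 + (cur.length : Int) + 1 = i := by ring
      rw [hpos]
      have ih' := ih [] (i + 1) (if (cur.head? == some '\\') then acc else acc ++ [i])
      simp only [List.length_nil, Nat.cast_zero, List.head?_nil] at ih'
      rw [show (i + 1) - (0 : Int) - 1 = i from by ring] at ih'
      rw [ih']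
      by_cases he : cur.head? = some '\\' <;> simp [pvScanB, he]
    · simp only [pvSplitAux]
      rw [if_neg hc]
      have hlen : i - (cur.length : Int) - 1 = (i + 1) - (((c :: cur).length : Int)) - 1 := by
        simp only [List.length_cons]; push_cast; ring
      rw [hlen, ih (c :: cur) (i + 1) acc]
      by_cases h2 : c = '\\' <;> simp [pvScanB, hc, h2]

/-- A's fold over the enumerated string computes pvScan, for any suffix. -/
lemma a_fold_eq (full : List Char) : ∀ (suffix : List Char) (k : Nat) (acc : List Int),
    full.drop k = suffix →
    (PySem.List.enumerate suffix (k : Int)).foldl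
      (fun indices ic =>
        if ic.2 ≠ '%' then indices
        else
          if (if ic.1 = 0 then none else PySem.Chars.pyGet? full (ic.1 - 1)) ≠ some '\\'
          then indices ++ [ic.1] else indices)
      acc
      = acc ++ pvScan (if k = 0 then none else full[k - 1]?) k suffix := by
  intro suffix
  induction suffix with
  | nil => intro k acc _; simp [pvScan]
  | cons c cs ih =>
    intro k acc hdrop
    have hk : k < full.length := by
      by_contra h
      simp [List.drop_eq_nil_of_le (Nat.le_of_not_lt h)] at hdrop
    rw [List.drop_eq_getElem_cons hk] at hdrop
    injection hdrop with h1 hnext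
    have hck : full[k]? = some c := by
      rw [List.getElem?_eq_getElem hk, h1]
    have hprev : (if (k : Int) = 0 then none else PySem.Chars.pyGet? full ((k : Int) - 1))
        = (if k = 0 then none else full[k - 1]?) := by
      by_cases h0 : k = 0
      · simp [h0]
      · have hne : (k : Int) ≠ 0 := by exact_mod_cast h0
        have hcast : ((k : Int) - 1) = ((k - 1 : Nat) : Int) := by omega
        simp [h0, hcast, PySem.Chars.pyGet?]
    simp only [PySem.List.enumerate_cons, List.foldl_cons, hprev]
    have hacc : (if c ≠ '%' then acc
        else if (if k = 0 then none else full[k - 1]?) ≠ some '\\' then acc ++ [(k : Int)] else acc)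
        = acc ++ (if c = '%' ∧ (if k = 0 then none else full[k - 1]?) ≠ some '\\' then [(k : Int)] else []) := by
      split_ifs <;> simp_all
    rw [hacc]
    rw [show ((k : Int) + 1) = ((k + 1 : Nat) : Int) by push_cast; ring]
    rw [ih (k + 1) _ hnext]
    simp [pvScan, hck, List.append_assoc]

-- ===== VERDICT (by name: the statement is the Claim_ definition above) =====
theorem find_percent_characters_spec : Claim_equal_find_percent_characters := by
  intro s _
  unfold Spec_find_percent_characters find_percent_characters find_percent_characters_alt
  have ha := a_fold_eq s.toList s.toList 0 [] (by simp)
  simp only [Nat.cast_zero] at ha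
  rw [ha, splitOn_eq_aux]
  have hb := b_fold_eq s.toList [] 0 []
  simp only [List.length_nil, Nat.cast_zero, List.head?_nil, List.nil_append] at hb
  rw [show (0 : Int) - 0 - 1 = -1 from by ring] at hb
  rw [hb]
  simp [pvScan_eq_pvScanB]
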